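-- pv_equiv track=rewrite | github.com/zoeezhang3/CodePath | session_3_unit_1.py | arrange_attendees_by_priority
-- ===== SOURCE A (Python) =====
-- def arrange_attendees_by_priority(attendees, priority):
--   # less_than = [x for x in attendees if x < priority]
--   # equal_to = [x for x in attendees if x == priority]
--   # greater_than = [x for x in attendees if x > priority]
--   # return less_than + equal_to + greater_than
--
--   low, mid, high = 0, 0, len(attendees)-1
--   #  low for mark the element as the lowest, keep it in the left
--
--   while mid <= high:
--     if attendees[mid] < priority:
--       attendees.insert(low, attendees.pop(mid))
--       low += 1
--       mid += 1
--     elif attendees[mid] > priority: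
--       attendees.append(attendees.pop(mid))
--       high -= 1
--     else:
--       mid += 1
--   return attendees
-- ===== SOURCE B (Python) =====
-- def arrange_attendees_by_priority(attendees, priority):
--     less, equal, greater = [], [], []
--     for x in attendees:
--         if x < priority:
--             less.append(x)
--         elif x > priority:
--             greater.append(x)
--         else:
--             equal.append(x)
--     return less + equal + greater
-- ===== Notes on version B (the rewrite author's own statement) =====
-- stated objective: faster
-- what changed: Replaces the quadratic in-place insert/pop Dutch-flag loop with a single linear pass that collects the less/equal/greater buckets and concatenates them.
import Mathlib
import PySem

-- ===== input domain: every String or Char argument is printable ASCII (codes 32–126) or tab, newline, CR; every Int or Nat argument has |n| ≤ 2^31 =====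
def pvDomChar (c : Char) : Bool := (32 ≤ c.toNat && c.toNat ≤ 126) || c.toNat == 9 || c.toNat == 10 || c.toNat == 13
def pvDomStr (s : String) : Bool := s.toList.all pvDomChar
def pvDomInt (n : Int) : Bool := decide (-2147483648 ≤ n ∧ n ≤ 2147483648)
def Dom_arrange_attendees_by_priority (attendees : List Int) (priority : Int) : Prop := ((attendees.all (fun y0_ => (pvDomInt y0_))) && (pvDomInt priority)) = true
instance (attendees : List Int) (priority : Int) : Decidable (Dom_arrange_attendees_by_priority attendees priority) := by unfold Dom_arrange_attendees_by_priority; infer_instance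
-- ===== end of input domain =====

-- B replaces A's quadratic in-place insert/pop partition loop by one linear pass building
-- the three buckets; A mutates its argument in place, the equivalence proved is about the
-- RETURN value only (B does not mutate).

-- ===== PORT A =====
-- the while loop of A: state (attendees, low, mid, high); each branch mirrors A's code
def pvA_loop (attendees : List Int) (priority low mid high : Int) : List Int :=
  if mid ≤ high then
    match PySem.List.pyGet? attendees mid with
    | none => attendees   -- unreachable totality guard (index always in range)
    | some x =>
      if x < priority then
        match PySem.List.pop? attendees mid with
        | none => attendees  -- unreachable totality guard
        | some (v, rest) => pvA_loop (PySem.List.insert rest low v) priority (low + 1) (mid + 1) high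
      else if x > priority then
        match PySem.List.pop? attendees mid with
        | none => attendees  -- unreachable totality guard
        | some (v, rest) => pvA_loop (rest ++ [v]) priority low mid (high - 1)
      else pvA_loop attendees priority low (mid + 1) high
  else attendees
termination_by (high - mid + 1).toNat
decreasing_by all_goals omega

def arrange_attendees_by_priority (attendees : List Int) (priority : Int) : List Int :=
  pvA_loop attendees priority 0 0 ((attendees.length : Int) - 1)

-- ===== PORT B =====
-- B's single pass with three accumulators
def pvB_loop (xs : List Int) (priority : Int) (less equal greater : List Int) : List Int × List Int × List Int :=
  match xs with
  | [] => (less, equal, greater)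
  | x :: rest =>
    if x < priority then pvB_loop rest priority (less ++ [x]) equal greater
    else if x > priority then pvB_loop rest priority less equal (greater ++ [x])
    else pvB_loop rest priority less (equal ++ [x]) greater

def arrange_attendees_by_priority_alt (attendees : List Int) (priority : Int) : List Int :=
  match pvB_loop attendees priority [] [] [] with
  | (less, equal, greater) => less ++ equal ++ greater

-- ===== PRECONDITION & SPEC =====
def Spec_arrange_attendees_by_priority (attendees : List Int) (priority : Int) (out : List Int) : Prop := out = arrange_attendees_by_priority_alt attendees priority
instance (attendees : List Int) (priority : Int) (out : List Int) : Decidable (Spec_arrange_attendees_by_priority attendees priority out) := by unfold Spec_arrange_attendees_by_priority; infer_instance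

-- ===== CLAIM (what is proved, stated in full; the proofs are below) =====
def Claim_equal_arrange_attendees_by_priority : Prop := ∀ (attendees : List Int) (priority : Int), Dom_arrange_attendees_by_priority attendees priority → Spec_arrange_attendees_by_priority attendees priority (arrange_attendees_by_priority attendees priority)

-- ===== LEMMAS AND PROOFS =====

lemma pv_pop_pre (pre ys : List Int) (x : Int) :
    PySem.List.pop? (pre ++ x :: ys) ((pre.length : Int)) = some (x, pre ++ ys) := by
  rw [PySem.List.pop?_natCast _ pre.length (by simp)]
  rw [List.eraseIdx_append_of_length_le (le_refl _)]
  simp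

lemma pv_insert_pre (pre tail : List Int) (v : Int) :
    PySem.List.insert (pre ++ tail) ((pre.length : Int)) v = pre ++ v :: tail := by
  rw [PySem.List.insert_natCast _ _ _ (by simp)]
  simp

lemma pvA_loop_arg_congr (l l' : List Int) (p a a' b b' c c' : Int)
    (hl : l = l') (ha : a = a') (hb : b = b') (hc : c = c') :
    pvA_loop l p a b c = pvA_loop l' p a' b' c' := by
  subst hl; subst ha; subst hb; subst hc; rfl

lemma pvA_loop_eq (p : Int) (M : List Int) : ∀ (L E G : List Int),
    pvA_loop (L ++ E ++ M ++ G) p (L.length : Int) ((L.length : Int) + (E.length : Int))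
      ((L.length : Int) + (E.length : Int) + (M.length : Int) - 1)
    = L ++ M.filter (· < p) ++ E ++ M.filter (· = p) ++ G ++ M.filter (fun x => p < x) := by
  induction M with
  | nil =>
    intro L E G
    rw [pvA_loop, if_neg (by simp)]
    simp
  | cons x M' IH =>
    intro L E G
    have hg : PySem.List.pyGet? (L ++ E ++ (x :: M') ++ G) ((L.length : Int) + (E.length : Int))
        = some x := by
      rw [show L ++ E ++ (x :: M') ++ G = (L ++ E) ++ x :: (M' ++ G) by simp,
          show ((L.length : Int) + (E.length : Int)) = (((L ++ E).length : Int)) by simp]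
      exact PySem.List.pyGet?_append_length _ _ _
    have hp : PySem.List.pop? (L ++ E ++ (x :: M') ++ G) ((L.length : Int) + (E.length : Int))
        = some (x, (L ++ E) ++ (M' ++ G)) := by
      rw [show L ++ E ++ (x :: M') ++ G = (L ++ E) ++ x :: (M' ++ G) by simp,
          show ((L.length : Int) + (E.length : Int)) = (((L ++ E).length : Int)) by simp]
      exact pv_pop_pre _ _ _
    rw [pvA_loop, if_pos (by simp only [List.length_cons]; push_cast; omega)]
    simp only [hg, hp]
    by_cases h1 : x < p
    · rw [if_pos h1]
      rw [show (L ++ E) ++ (M' ++ G) = L ++ (E ++ (M' ++ G)) by simp, pv_insert_pre]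
      rw [pvA_loop_arg_congr _ ((L ++ [x]) ++ E ++ M' ++ G) p _ (((L ++ [x]).length : Int))
            _ (((L ++ [x]).length : Int) + (E.length : Int))
            _ (((L ++ [x]).length : Int) + (E.length : Int) + (M'.length : Int) - 1)
            (by simp) (by simp) (by simp; ring)
            (by simp only [List.length_cons, List.length_append, List.length_nil]; push_cast; ring),
          IH (L ++ [x]) E G]
      simp [h1, ne_of_lt h1, asymm h1]
    · by_cases h2 : p < x
      · rw [if_neg h1, if_pos h2]
        rw [pvA_loop_arg_congr _ (L ++ E ++ M' ++ (G ++ [x])) p _ ((L.length : Int))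
              _ ((L.length : Int) + (E.length : Int))
              _ ((L.length : Int) + (E.length : Int) + (M'.length : Int) - 1)
              (by simp) rfl rfl
              (by simp only [List.length_cons]; push_cast; ring),
            IH L E (G ++ [x])]
        simp [h1, h2, ne_of_gt h2]
      · have hx : x = p := le_antisymm (not_lt.mp h2) (not_lt.mp h1)
        rw [if_neg h1, if_neg h2]
        rw [pvA_loop_arg_congr _ (L ++ (E ++ [x]) ++ M' ++ G) p _ ((L.length : Int))
              _ ((L.length : Int) + ((E ++ [x]).length : Int))
              _ ((L.length : Int) + ((E ++ [x]).length : Int) + (M'.length : Int) - 1)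
              (by simp) rfl (by simp; ring)
              (by simp only [List.length_cons, List.length_append, List.length_nil]; push_cast; ring),
            IH L (E ++ [x]) G]
        simp [hx]

lemma pvB_loop_eq (p : Int) (xs : List Int) : ∀ (less equal greater : List Int),
    pvB_loop xs p less equal greater
    = (less ++ xs.filter (· < p), equal ++ xs.filter (· = p), greater ++ xs.filter (fun x => p < x)) := by
  induction xs with
  | nil => intro l e g; simp [pvB_loop]
  | cons x rest IH =>
    intro l e g
    by_cases h1 : x < p
    · rw [pvB_loop, if_pos h1, IH]
      simp [h1, not_lt.mpr (le_of_lt h1), ne_of_lt h1]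
    · by_cases h2 : p < x
      · rw [pvB_loop, if_neg h1, if_pos h2, IH]
        simp [h1, h2, ne_of_gt h2]
      · have hx : x = p := le_antisymm (not_lt.mp h2) (not_lt.mp h1)
        rw [pvB_loop, if_neg h1, if_neg h2, IH]
        simp [hx]

-- ===== VERDICT (by name: the statement is the Claim_ definition above) =====
theorem arrange_attendees_by_priority_spec : Claim_equal_arrange_attendees_by_priority := by
  intro attendees priority _
  unfold Spec_arrange_attendees_by_priority arrange_attendees_by_priority arrange_attendees_by_priority_alt
  have hA := pvA_loop_eq priority attendees [] [] []
  have hB := pvB_loop_eq priority attendees [] [] []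
  simp only [List.nil_append, List.append_nil, List.length_nil, Nat.cast_zero, zero_add] at hA ⊢
  rw [hA, hB]
  simp
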